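-- pv_equiv track=rewrite | github.com/mahin31111/Vityarthi-Project | vitproj.py | predict_disease
-- ===== SOURCE A (Python) =====
-- disease_symptoms = {
--     "Common Cold": [
--         "cough", "sore throat", "runny nose", "sneezing", "mild fever", "headache"
--     ],
--     "Flu": [
--         "high fever", "chills", "body ache", "fatigue", "cough", "headache"
--     ],
--     "Migraine": [
--         "headache", "nausea", "vomiting", "sensitivity to light", "sensitivity to sound"
--     ],
--     "Food Poisoning": [
--         "vomiting", "nausea", "diarrhea", "stomach pain", "fever"
--     ],
--     "Dengue": [
--         "high fever", "severe headache", "joint pain", "muscle pain", "rash"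
--     ],
--     "COVID-19": [
--         "fever", "dry cough", "tiredness", "loss of taste", "loss of smell", "shortness of breath"
--     ]
-- }
--
-- def clean_symptom(symptom: str) -> str:
--     """Normalize symptom text."""
--     return symptom.strip().lower()
--
-- def score_diseases(user_symptoms):
--     """
--     For each disease, count how many symptoms match the user symptoms.
--     Returns a dict: {disease: score}
--     """
--     scores = {}
--     for disease, sym_list in disease_symptoms.items():
--         normalized = [clean_symptom(s) for s in sym_list]
--         # intersection size = score
--         match_count = len(set(user_symptoms) & set(normalized))
--         scores[disease] = match_count
--     return scores
--
-- def predict_disease(user_symptoms, min_matches=1):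
--     scores = score_diseases(user_symptoms)
--
--     # find disease with maximum score
--     best_disease = None
--     best_score = 0
--     for disease, score in scores.items():
--         if score > best_score:
--             best_score = score
--             best_disease = disease
--
--     # if no disease has enough matches, return None
--     if best_score < min_matches:
--         return None, scores
--     return best_disease, scores
-- ===== SOURCE B (Python) =====
-- disease_symptoms = {
--     "Common Cold": [
--         "cough", "sore throat", "runny nose", "sneezing", "mild fever", "headache"
--     ],
--     "Flu": [
--         "high fever", "chills", "body ache", "fatigue", "cough", "headache"
--     ],
--     "Migraine": [
--         "headache", "nausea", "vomiting", "sensitivity to light", "sensitivity to sound"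
--     ],
--     "Food Poisoning": [
--         "vomiting", "nausea", "diarrhea", "stomach pain", "fever"
--     ],
--     "Dengue": [
--         "high fever", "severe headache", "joint pain", "muscle pain", "rash"
--     ],
--     "COVID-19": [
--         "fever", "dry cough", "tiredness", "loss of taste", "loss of smell", "shortness of breath"
--     ]
-- }
--
-- # inverted index: normalized symptom -> diseases containing it (built once)
-- _index = {}
-- for _d, _syms in disease_symptoms.items():
--     for _s in _syms:
--         _index.setdefault(_s.strip().lower(), []).append(_d)
--
--
-- def predict_disease(user_symptoms, min_matches=1):
--     scores = {d: 0 for d in disease_symptoms}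
--     for s in dict.fromkeys(user_symptoms):  # distinct user symptoms
--         for d in _index.get(s, ()):
--             scores[d] += 1
--     best_disease = None
--     best_score = 0
--     for d, sc in scores.items():
--         if sc > best_score:
--             best_score = sc
--             best_disease = d
--     if best_score < min_matches:
--         return None, scores
--     return best_disease, scores
-- ===== Notes on version B (the rewrite author's own statement) =====
-- stated objective: faster
-- what changed: Replaces A's per-disease set intersections (rebuilding and intersecting sets for every disease on each call) with an inverted index from normalized symptom to diseases built once at module load; scores start at zero for every disease in order and one pass over the distinct user symptoms increments the diseases each symptom maps to; the max scan and min_matches check are unchanged. The per-call work drops because set construction/intersection per disease is replaced by the one-time index and a single dict-increment pass.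
import Mathlib
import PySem

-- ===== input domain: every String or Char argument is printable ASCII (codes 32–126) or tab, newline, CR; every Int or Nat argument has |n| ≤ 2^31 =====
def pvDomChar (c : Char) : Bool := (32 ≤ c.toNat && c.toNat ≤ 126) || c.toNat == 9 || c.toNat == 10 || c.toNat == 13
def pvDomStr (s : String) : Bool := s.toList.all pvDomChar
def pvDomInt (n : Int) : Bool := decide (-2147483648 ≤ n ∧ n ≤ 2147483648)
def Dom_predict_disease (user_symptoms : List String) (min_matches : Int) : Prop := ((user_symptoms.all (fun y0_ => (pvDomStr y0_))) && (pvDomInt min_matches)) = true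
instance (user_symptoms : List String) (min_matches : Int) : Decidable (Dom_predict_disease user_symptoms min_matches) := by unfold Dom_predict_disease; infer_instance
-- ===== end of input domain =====

set_option maxRecDepth 16384
set_option maxHeartbeats 1000000

-- B replaces A's per-disease set intersections with a precomputed inverted index
-- (normalized symptom -> diseases) and a single pass over the distinct user symptoms
-- (objective: alternative data structure; same result proved below).

-- ===== PORT A =====
-- the module constant disease_symptoms, shared by both implementations
def diseaseSymptoms : List (String × List String) :=
  [("Common Cold", ["cough", "sore throat", "runny nose", "sneezing", "mild fever", "headache"]),
   ("Flu", ["high fever", "chills", "body ache", "fatigue", "cough", "headache"]),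
   ("Migraine", ["headache", "nausea", "vomiting", "sensitivity to light", "sensitivity to sound"]),
   ("Food Poisoning", ["vomiting", "nausea", "diarrhea", "stomach pain", "fever"]),
   ("Dengue", ["high fever", "severe headache", "joint pain", "muscle pain", "rash"]),
   ("COVID-19", ["fever", "dry cough", "tiredness", "loss of taste", "loss of smell", "shortness of breath"])]

def clean_symptom (symptom : String) : String :=
  PySem.Str.lower (PySem.Str.strip symptom)

def score_diseases (user_symptoms : List String) : PySem.Dict String Int :=
  diseaseSymptoms.foldl
    (fun scores p =>
      let normalized := p.2.map clean_symptom
      let match_count : Int :=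
        ((PySem.Set.inter (PySem.Set.ofList user_symptoms) (PySem.Set.ofList normalized)).length : Int)
      scores.insert p.1 match_count)
    PySem.Dict.empty

def predict_disease (user_symptoms : List String) (min_matches : Int) : Option String × (List (String × Int)) :=
  let scores := score_diseases user_symptoms
  let best :=
    scores.items.foldl
      (fun (acc : Option String × Int) p => if p.2 > acc.2 then (some p.1, p.2) else acc)
      (none, 0)
  if best.2 < min_matches then (none, scores.items) else (best.1, scores.items)

-- ===== PORT B =====
-- inverted index, built once at module level in Source B (setdefault + append)
def pvIndex : PySem.Dict String (List String) :=
  diseaseSymptoms.foldl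
    (fun idx p =>
      p.2.foldl
        (fun idx s =>
          let key := PySem.Str.lower (PySem.Str.strip s)
          idx.insert key (idx.getD key [] ++ [p.1]))
        idx)
    PySem.Dict.empty

def predict_disease_alt (user_symptoms : List String) (min_matches : Int) : Option String × (List (String × Int)) :=
  let scores0 : PySem.Dict String Int :=
    diseaseSymptoms.foldl (fun d p => d.insert p.1 0) PySem.Dict.empty
  let scores :=
    (PySem.List.dedup user_symptoms).foldl
      (fun sc s => (pvIndex.getD s []).foldl (fun sc d => sc.modify d 0 (· + 1)) sc)
      scores0
  let best :=
    scores.items.foldl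
      (fun (acc : Option String × Int) p => if p.2 > acc.2 then (some p.1, p.2) else acc)
      (none, 0)
  if best.2 < min_matches then (none, scores.items) else (best.1, scores.items)

-- ===== PRECONDITION & SPEC =====
def Spec_predict_disease (user_symptoms : List String) (min_matches : Int) (out : Option String × (List (String × Int))) : Prop := out = predict_disease_alt user_symptoms min_matches
instance (user_symptoms : List String) (min_matches : Int) (out : Option String × (List (String × Int))) : Decidable (Spec_predict_disease user_symptoms min_matches out) := by unfold Spec_predict_disease; infer_instance

-- ===== CLAIM (what is proved, stated in full; the proofs are below) =====
def Claim_equal_predict_disease : Prop := ∀ (user_symptoms : List String) (min_matches : Int), Dom_predict_disease user_symptoms min_matches → Spec_predict_disease user_symptoms min_matches (predict_disease user_symptoms min_matches)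

-- ===== LEMMAS AND PROOFS =====

-- the six cleaned symptom lists of diseaseSymptoms
def pvL1 : List String := ["cough", "sore throat", "runny nose", "sneezing", "mild fever", "headache"]
def pvL2 : List String := ["high fever", "chills", "body ache", "fatigue", "cough", "headache"]
def pvL3 : List String := ["headache", "nausea", "vomiting", "sensitivity to light", "sensitivity to sound"]
def pvL4 : List String := ["vomiting", "nausea", "diarrhea", "stomach pain", "fever"]
def pvL5 : List String := ["high fever", "severe headache", "joint pain", "muscle pain", "rash"]
def pvL6 : List String := ["fever", "dry cough", "tiredness", "loss of taste", "loss of smell", "shortness of breath"]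

-- a score dict with the six disease keys in insertion order
def pvMk (a b c d e f : Int) : PySem.Dict String Int :=
  PySem.Dict.mk [("Common Cold", a), ("Flu", b), ("Migraine", c),
                 ("Food Poisoning", d), ("Dengue", e), ("COVID-19", f)]

-- count (as Int) of elements of us lying in L
def pvCnt (L : List String) (us : List String) : Int :=
  (us.countP (fun s => L.contains s) : Int)

-- 0/1 indicator of membership of s in L
def pvInd (L : List String) (s : String) : Int := if L.contains s then 1 else 0

theorem cntOf (L : List String) (hL : PySem.Set.ofList L = L) (us : List String) :
    ((PySem.Set.inter (PySem.Set.ofList us) (PySem.Set.ofList L)).length : Int)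
      = pvCnt L (PySem.Set.ofList us) := by
  simp [PySem.Set.inter, hL, pvCnt, List.countP_eq_length_filter]

-- A's scores dict, disease by disease
theorem pvScoreA (us : List String) :
    score_diseases us =
      pvMk (pvCnt pvL1 (PySem.Set.ofList us)) (pvCnt pvL2 (PySem.Set.ofList us))
           (pvCnt pvL3 (PySem.Set.ofList us)) (pvCnt pvL4 (PySem.Set.ofList us))
           (pvCnt pvL5 (PySem.Set.ofList us)) (pvCnt pvL6 (PySem.Set.ofList us)) := by
  unfold score_diseases diseaseSymptoms
  simp only [List.foldl_cons, List.foldl_nil]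
  rw [show (List.map clean_symptom ["cough", "sore throat", "runny nose", "sneezing", "mild fever", "headache"]) = pvL1 from by decide]
  rw [show (List.map clean_symptom ["high fever", "chills", "body ache", "fatigue", "cough", "headache"]) = pvL2 from by decide]
  rw [show (List.map clean_symptom ["headache", "nausea", "vomiting", "sensitivity to light", "sensitivity to sound"]) = pvL3 from by decide]
  rw [show (List.map clean_symptom ["vomiting", "nausea", "diarrhea", "stomach pain", "fever"]) = pvL4 from by decide]
  rw [show (List.map clean_symptom ["high fever", "severe headache", "joint pain", "muscle pain", "rash"]) = pvL5 from by decide]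
  rw [show (List.map clean_symptom ["fever", "dry cough", "tiredness", "loss of taste", "loss of smell", "shortness of breath"]) = pvL6 from by decide]
  rw [cntOf pvL1 (by decide), cntOf pvL2 (by decide), cntOf pvL3 (by decide),
      cntOf pvL4 (by decide), cntOf pvL5 (by decide), cntOf pvL6 (by decide)]
  rfl

-- one `scores[d] += 1` pass evaluated on the six-key dict, per disease key
theorem pvM1 (a b c d e f : Int) : (pvMk a b c d e f).modify "Common Cold" 0 (· + 1) = pvMk (a+1) b c d e f := rfl
theorem pvM2 (a b c d e f : Int) : (pvMk a b c d e f).modify "Flu" 0 (· + 1) = pvMk a (b+1) c d e f := rfl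
theorem pvM3 (a b c d e f : Int) : (pvMk a b c d e f).modify "Migraine" 0 (· + 1) = pvMk a b (c+1) d e f := rfl
theorem pvM4 (a b c d e f : Int) : (pvMk a b c d e f).modify "Food Poisoning" 0 (· + 1) = pvMk a b c (d+1) e f := rfl
theorem pvM5 (a b c d e f : Int) : (pvMk a b c d e f).modify "Dengue" 0 (· + 1) = pvMk a b c d (e+1) f := rfl
theorem pvM6 (a b c d e f : Int) : (pvMk a b c d e f).modify "COVID-19" 0 (· + 1) = pvMk a b c d e (f+1) := rfl

-- processing one user symptom s increments exactly the diseases whose list contains s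
theorem pvStep (s : String) (a b c d e f : Int) :
    (pvIndex.getD s []).foldl (fun sc d => sc.modify d 0 (· + 1)) (pvMk a b c d e f) =
      pvMk (a + pvInd pvL1 s) (b + pvInd pvL2 s) (c + pvInd pvL3 s)
           (d + pvInd pvL4 s) (e + pvInd pvL5 s) (f + pvInd pvL6 s) := by
  have hIdx : pvIndex = PySem.Dict.mk
    [("cough", ["Common Cold", "Flu"]),
    ("sore throat", ["Common Cold"]),
    ("runny nose", ["Common Cold"]),
    ("sneezing", ["Common Cold"]),
    ("mild fever", ["Common Cold"]),
    ("headache", ["Common Cold", "Flu", "Migraine"]),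
    ("high fever", ["Flu", "Dengue"]),
    ("chills", ["Flu"]),
    ("body ache", ["Flu"]),
    ("fatigue", ["Flu"]),
    ("nausea", ["Migraine", "Food Poisoning"]),
    ("vomiting", ["Migraine", "Food Poisoning"]),
    ("sensitivity to light", ["Migraine"]),
    ("sensitivity to sound", ["Migraine"]),
    ("diarrhea", ["Food Poisoning"]),
    ("stomach pain", ["Food Poisoning"]),
    ("fever", ["Food Poisoning", "COVID-19"]),
    ("severe headache", ["Dengue"]),
    ("joint pain", ["Dengue"]),
    ("muscle pain", ["Dengue"]),
    ("rash", ["Dengue"]),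
    ("dry cough", ["COVID-19"]),
    ("tiredness", ["COVID-19"]),
    ("loss of taste", ["COVID-19"]),
    ("loss of smell", ["COVID-19"]),
    ("shortness of breath", ["COVID-19"])] := by decide
  rw [hIdx]; clear hIdx
  simp only [PySem.Dict.getD, PySem.Dict.get?_mk_cons]
  by_cases h1 : ("cough" == s) = true
  · rw [if_pos h1]; simp only [beq_iff_eq] at h1; subst h1
    simp only [Option.getD_some, List.foldl_cons, List.foldl_nil, pvM1, pvM2, pvM3, pvM4, pvM5, pvM6]
    simp [pvMk, pvInd, pvL1, pvL2, pvL3, pvL4, pvL5, pvL6]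
  rw [if_neg h1]
  by_cases h2 : ("sore throat" == s) = true
  · rw [if_pos h2]; simp only [beq_iff_eq] at h2; subst h2
    simp only [Option.getD_some, List.foldl_cons, List.foldl_nil, pvM1, pvM2, pvM3, pvM4, pvM5, pvM6]
    simp [pvMk, pvInd, pvL1, pvL2, pvL3, pvL4, pvL5, pvL6]
  rw [if_neg h2]
  by_cases h3 : ("runny nose" == s) = true
  · rw [if_pos h3]; simp only [beq_iff_eq] at h3; subst h3
    simp only [Option.getD_some, List.foldl_cons, List.foldl_nil, pvM1, pvM2, pvM3, pvM4, pvM5, pvM6]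
    simp [pvMk, pvInd, pvL1, pvL2, pvL3, pvL4, pvL5, pvL6]
  rw [if_neg h3]
  by_cases h4 : ("sneezing" == s) = true
  · rw [if_pos h4]; simp only [beq_iff_eq] at h4; subst h4
    simp only [Option.getD_some, List.foldl_cons, List.foldl_nil, pvM1, pvM2, pvM3, pvM4, pvM5, pvM6]
    simp [pvMk, pvInd, pvL1, pvL2, pvL3, pvL4, pvL5, pvL6]
  rw [if_neg h4]
  by_cases h5 : ("mild fever" == s) = true
  · rw [if_pos h5]; simp only [beq_iff_eq] at h5; subst h5
    simp only [Option.getD_some, List.foldl_cons, List.foldl_nil, pvM1, pvM2, pvM3, pvM4, pvM5, pvM6]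
    simp [pvMk, pvInd, pvL1, pvL2, pvL3, pvL4, pvL5, pvL6]
  rw [if_neg h5]
  by_cases h6 : ("headache" == s) = true
  · rw [if_pos h6]; simp only [beq_iff_eq] at h6; subst h6
    simp only [Option.getD_some, List.foldl_cons, List.foldl_nil, pvM1, pvM2, pvM3, pvM4, pvM5, pvM6]
    simp [pvMk, pvInd, pvL1, pvL2, pvL3, pvL4, pvL5, pvL6]
  rw [if_neg h6]
  by_cases h7 : ("high fever" == s) = true
  · rw [if_pos h7]; simp only [beq_iff_eq] at h7; subst h7
    simp only [Option.getD_some, List.foldl_cons, List.foldl_nil, pvM1, pvM2, pvM3, pvM4, pvM5, pvM6]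
    simp [pvMk, pvInd, pvL1, pvL2, pvL3, pvL4, pvL5, pvL6]
  rw [if_neg h7]
  by_cases h8 : ("chills" == s) = true
  · rw [if_pos h8]; simp only [beq_iff_eq] at h8; subst h8
    simp only [Option.getD_some, List.foldl_cons, List.foldl_nil, pvM1, pvM2, pvM3, pvM4, pvM5, pvM6]
    simp [pvMk, pvInd, pvL1, pvL2, pvL3, pvL4, pvL5, pvL6]
  rw [if_neg h8]
  by_cases h9 : ("body ache" == s) = true
  · rw [if_pos h9]; simp only [beq_iff_eq] at h9; subst h9
    simp only [Option.getD_some, List.foldl_cons, List.foldl_nil, pvM1, pvM2, pvM3, pvM4, pvM5, pvM6]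
    simp [pvMk, pvInd, pvL1, pvL2, pvL3, pvL4, pvL5, pvL6]
  rw [if_neg h9]
  by_cases h10 : ("fatigue" == s) = true
  · rw [if_pos h10]; simp only [beq_iff_eq] at h10; subst h10
    simp only [Option.getD_some, List.foldl_cons, List.foldl_nil, pvM1, pvM2, pvM3, pvM4, pvM5, pvM6]
    simp [pvMk, pvInd, pvL1, pvL2, pvL3, pvL4, pvL5, pvL6]
  rw [if_neg h10]
  by_cases h11 : ("nausea" == s) = true
  · rw [if_pos h11]; simp only [beq_iff_eq] at h11; subst h11
    simp only [Option.getD_some, List.foldl_cons, List.foldl_nil, pvM1, pvM2, pvM3, pvM4, pvM5, pvM6]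
    simp [pvMk, pvInd, pvL1, pvL2, pvL3, pvL4, pvL5, pvL6]
  rw [if_neg h11]
  by_cases h12 : ("vomiting" == s) = true
  · rw [if_pos h12]; simp only [beq_iff_eq] at h12; subst h12
    simp only [Option.getD_some, List.foldl_cons, List.foldl_nil, pvM1, pvM2, pvM3, pvM4, pvM5, pvM6]
    simp [pvMk, pvInd, pvL1, pvL2, pvL3, pvL4, pvL5, pvL6]
  rw [if_neg h12]
  by_cases h13 : ("sensitivity to light" == s) = true
  · rw [if_pos h13]; simp only [beq_iff_eq] at h13; subst h13
    simp only [Option.getD_some, List.foldl_cons, List.foldl_nil, pvM1, pvM2, pvM3, pvM4, pvM5, pvM6]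
    simp [pvMk, pvInd, pvL1, pvL2, pvL3, pvL4, pvL5, pvL6]
  rw [if_neg h13]
  by_cases h14 : ("sensitivity to sound" == s) = true
  · rw [if_pos h14]; simp only [beq_iff_eq] at h14; subst h14
    simp only [Option.getD_some, List.foldl_cons, List.foldl_nil, pvM1, pvM2, pvM3, pvM4, pvM5, pvM6]
    simp [pvMk, pvInd, pvL1, pvL2, pvL3, pvL4, pvL5, pvL6]
  rw [if_neg h14]
  by_cases h15 : ("diarrhea" == s) = true
  · rw [if_pos h15]; simp only [beq_iff_eq] at h15; subst h15
    simp only [Option.getD_some, List.foldl_cons, List.foldl_nil, pvM1, pvM2, pvM3, pvM4, pvM5, pvM6]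
    simp [pvMk, pvInd, pvL1, pvL2, pvL3, pvL4, pvL5, pvL6]
  rw [if_neg h15]
  by_cases h16 : ("stomach pain" == s) = true
  · rw [if_pos h16]; simp only [beq_iff_eq] at h16; subst h16
    simp only [Option.getD_some, List.foldl_cons, List.foldl_nil, pvM1, pvM2, pvM3, pvM4, pvM5, pvM6]
    simp [pvMk, pvInd, pvL1, pvL2, pvL3, pvL4, pvL5, pvL6]
  rw [if_neg h16]
  by_cases h17 : ("fever" == s) = true
  · rw [if_pos h17]; simp only [beq_iff_eq] at h17; subst h17
    simp only [Option.getD_some, List.foldl_cons, List.foldl_nil, pvM1, pvM2, pvM3, pvM4, pvM5, pvM6]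
    simp [pvMk, pvInd, pvL1, pvL2, pvL3, pvL4, pvL5, pvL6]
  rw [if_neg h17]
  by_cases h18 : ("severe headache" == s) = true
  · rw [if_pos h18]; simp only [beq_iff_eq] at h18; subst h18
    simp only [Option.getD_some, List.foldl_cons, List.foldl_nil, pvM1, pvM2, pvM3, pvM4, pvM5, pvM6]
    simp [pvMk, pvInd, pvL1, pvL2, pvL3, pvL4, pvL5, pvL6]
  rw [if_neg h18]
  by_cases h19 : ("joint pain" == s) = true
  · rw [if_pos h19]; simp only [beq_iff_eq] at h19; subst h19
    simp only [Option.getD_some, List.foldl_cons, List.foldl_nil, pvM1, pvM2, pvM3, pvM4, pvM5, pvM6]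
    simp [pvMk, pvInd, pvL1, pvL2, pvL3, pvL4, pvL5, pvL6]
  rw [if_neg h19]
  by_cases h20 : ("muscle pain" == s) = true
  · rw [if_pos h20]; simp only [beq_iff_eq] at h20; subst h20
    simp only [Option.getD_some, List.foldl_cons, List.foldl_nil, pvM1, pvM2, pvM3, pvM4, pvM5, pvM6]
    simp [pvMk, pvInd, pvL1, pvL2, pvL3, pvL4, pvL5, pvL6]
  rw [if_neg h20]
  by_cases h21 : ("rash" == s) = true
  · rw [if_pos h21]; simp only [beq_iff_eq] at h21; subst h21
    simp only [Option.getD_some, List.foldl_cons, List.foldl_nil, pvM1, pvM2, pvM3, pvM4, pvM5, pvM6]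
    simp [pvMk, pvInd, pvL1, pvL2, pvL3, pvL4, pvL5, pvL6]
  rw [if_neg h21]
  by_cases h22 : ("dry cough" == s) = true
  · rw [if_pos h22]; simp only [beq_iff_eq] at h22; subst h22
    simp only [Option.getD_some, List.foldl_cons, List.foldl_nil, pvM1, pvM2, pvM3, pvM4, pvM5, pvM6]
    simp [pvMk, pvInd, pvL1, pvL2, pvL3, pvL4, pvL5, pvL6]
  rw [if_neg h22]
  by_cases h23 : ("tiredness" == s) = true
  · rw [if_pos h23]; simp only [beq_iff_eq] at h23; subst h23
    simp only [Option.getD_some, List.foldl_cons, List.foldl_nil, pvM1, pvM2, pvM3, pvM4, pvM5, pvM6]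
    simp [pvMk, pvInd, pvL1, pvL2, pvL3, pvL4, pvL5, pvL6]
  rw [if_neg h23]
  by_cases h24 : ("loss of taste" == s) = true
  · rw [if_pos h24]; simp only [beq_iff_eq] at h24; subst h24
    simp only [Option.getD_some, List.foldl_cons, List.foldl_nil, pvM1, pvM2, pvM3, pvM4, pvM5, pvM6]
    simp [pvMk, pvInd, pvL1, pvL2, pvL3, pvL4, pvL5, pvL6]
  rw [if_neg h24]
  by_cases h25 : ("loss of smell" == s) = true
  · rw [if_pos h25]; simp only [beq_iff_eq] at h25; subst h25
    simp only [Option.getD_some, List.foldl_cons, List.foldl_nil, pvM1, pvM2, pvM3, pvM4, pvM5, pvM6]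
    simp [pvMk, pvInd, pvL1, pvL2, pvL3, pvL4, pvL5, pvL6]
  rw [if_neg h25]
  by_cases h26 : ("shortness of breath" == s) = true
  · rw [if_pos h26]; simp only [beq_iff_eq] at h26; subst h26
    simp only [Option.getD_some, List.foldl_cons, List.foldl_nil, pvM1, pvM2, pvM3, pvM4, pvM5, pvM6]
    simp [pvMk, pvInd, pvL1, pvL2, pvL3, pvL4, pvL5, pvL6]
  rw [if_neg h26]
  simp only [beq_iff_eq] at h1 h2 h3 h4 h5 h6 h7 h8 h9 h10 h11 h12 h13 h14 h15 h16 h17 h18 h19 h20 h21 h22 h23 h24 h25 h26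
  have n1 : s ≠ ("cough" : String) := fun e => h1 e.symm
  have n2 : s ≠ ("sore throat" : String) := fun e => h2 e.symm
  have n3 : s ≠ ("runny nose" : String) := fun e => h3 e.symm
  have n4 : s ≠ ("sneezing" : String) := fun e => h4 e.symm
  have n5 : s ≠ ("mild fever" : String) := fun e => h5 e.symm
  have n6 : s ≠ ("headache" : String) := fun e => h6 e.symm
  have n7 : s ≠ ("high fever" : String) := fun e => h7 e.symm
  have n8 : s ≠ ("chills" : String) := fun e => h8 e.symm
  have n9 : s ≠ ("body ache" : String) := fun e => h9 e.symm
  have n10 : s ≠ ("fatigue" : String) := fun e => h10 e.symm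
  have n11 : s ≠ ("nausea" : String) := fun e => h11 e.symm
  have n12 : s ≠ ("vomiting" : String) := fun e => h12 e.symm
  have n13 : s ≠ ("sensitivity to light" : String) := fun e => h13 e.symm
  have n14 : s ≠ ("sensitivity to sound" : String) := fun e => h14 e.symm
  have n15 : s ≠ ("diarrhea" : String) := fun e => h15 e.symm
  have n16 : s ≠ ("stomach pain" : String) := fun e => h16 e.symm
  have n17 : s ≠ ("fever" : String) := fun e => h17 e.symm
  have n18 : s ≠ ("severe headache" : String) := fun e => h18 e.symm
  have n19 : s ≠ ("joint pain" : String) := fun e => h19 e.symm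
  have n20 : s ≠ ("muscle pain" : String) := fun e => h20 e.symm
  have n21 : s ≠ ("rash" : String) := fun e => h21 e.symm
  have n22 : s ≠ ("dry cough" : String) := fun e => h22 e.symm
  have n23 : s ≠ ("tiredness" : String) := fun e => h23 e.symm
  have n24 : s ≠ ("loss of taste" : String) := fun e => h24 e.symm
  have n25 : s ≠ ("loss of smell" : String) := fun e => h25 e.symm
  have n26 : s ≠ ("shortness of breath" : String) := fun e => h26 e.symm
  have e1 : pvInd pvL1 s = 0 := by simp [pvInd, pvL1, n1, n2, n3, n4, n5, n6]
  have e2 : pvInd pvL2 s = 0 := by simp [pvInd, pvL2, n7, n8, n9, n10, n1, n6]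
  have e3 : pvInd pvL3 s = 0 := by simp [pvInd, pvL3, n6, n11, n12, n13, n14]
  have e4 : pvInd pvL4 s = 0 := by simp [pvInd, pvL4, n12, n11, n15, n16, n17]
  have e5 : pvInd pvL5 s = 0 := by simp [pvInd, pvL5, n7, n18, n19, n20, n21]
  have e6 : pvInd pvL6 s = 0 := by simp [pvInd, pvL6, n17, n22, n23, n24, n25, n26]
  rw [e1, e2, e3, e4, e5, e6]
  simp [pvMk, PySem.Dict.get?]

-- B's scoring loop, by induction on the distinct user symptoms
theorem pvFoldB (us : List String) (a b c d e f : Int) :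
    us.foldl (fun sc s => (pvIndex.getD s []).foldl (fun sc d => sc.modify d 0 (· + 1)) sc)
        (pvMk a b c d e f) =
      pvMk (a + pvCnt pvL1 us) (b + pvCnt pvL2 us) (c + pvCnt pvL3 us)
           (d + pvCnt pvL4 us) (e + pvCnt pvL5 us) (f + pvCnt pvL6 us) := by
  induction us generalizing a b c d e f with
  | nil => simp [pvCnt]
  | cons s t ih =>
    rw [List.foldl_cons, pvStep, ih]
    simp only [pvMk, pvCnt, pvInd, List.countP_cons, PySem.Dict.mk.injEq, List.cons.injEq,
               Prod.mk.injEq, and_true, true_and]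
    push_cast
    split_ifs <;> omega

-- ===== VERDICT (by name: the statement is the Claim_ definition above) =====
theorem predict_disease_spec : Claim_equal_predict_disease := by
  intro us m _
  unfold Spec_predict_disease predict_disease predict_disease_alt
  have hB :
      (PySem.List.dedup us).foldl
          (fun sc s => (pvIndex.getD s []).foldl (fun sc d => sc.modify d 0 (· + 1)) sc)
          (diseaseSymptoms.foldl (fun d p => d.insert p.1 0) PySem.Dict.empty)
        = score_diseases us := by
    have h0 : (diseaseSymptoms.foldl (fun d p => d.insert p.1 0) PySem.Dict.empty)
        = pvMk 0 0 0 0 0 0 := by decide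
    rw [h0, PySem.List.dedup_eq_ofList, pvFoldB, pvScoreA]
    simp
  simp only [hB]
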